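-- pv_equiv track=rewrite | github.com/langIman/CoReviewer | backend/services/wiki/article_generator.py | _build_commented_count_index
-- ===== SOURCE A (Python) =====
-- def _count_commented_methods(content: str) -> int:
--     """启发式计文件中被注释掉的方法/类数量（演进证据信号）。
--
--     iter1 漏代根因：LLM 没意识到 createVoucherOrder 所在文件含 4 段历史实现的注释代码块，
--     把 SimpleRedisLock 内部的 v1/v2 当成项目级演进。把这个信号显式喂给 step1 选符号时
--     优先权倾斜——含 N 段注释方法的文件就是"演进的中心"。
--
--     匹配 `/* ... */` 块且内容含 Java 类成员关键字的算一段。覆盖 TestProject 这类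
--     Java 项目，对 Python/Rust 注释风格不敏感（按需扩展）。
--     """
--     if not content or "/*" not in content:
--         return 0
--     count = 0
--     keywords = ("private ", "public ", "protected ", "@Override", "@Transactional")
--     i = 0
--     n = len(content)
--     while i < n - 1:
--         if content[i:i + 2] == "/*":
--             j = content.find("*/", i + 2)
--             if j < 0:
--                 break
--             block = content[i + 2:j]
--             if any(kw in block for kw in keywords):
--                 count += 1
--             i = j + 2
--         else:
--             i += 1
--     return count
--
-- def _build_commented_count_index(
--     project_files: dict[str, str],
--     relevant_paths: set[str],
-- ) -> dict[str, int]: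
--     """对 relevant_paths 范围内的文件预计算注释方法数。
--
--     范围限定避免对项目所有文件扫描——只算后续会引用的模块文件。
--     """
--     out: dict[str, int] = {}
--     for p in relevant_paths:
--         content = project_files.get(p)
--         if content:
--             out[p] = _count_commented_methods(content)
--     return out
-- ===== SOURCE B (Python) =====
-- _KEYWORDS = ("private ", "public ", "protected ", "@Override", "@Transactional")
-- _WMAX = max(len(k) for k in _KEYWORDS)  # 14
--
--
-- def _count_commented_methods(content: str) -> int:
--     """Single streaming pass: an explicit in-comment state machine with a bounded
--     rolling window for keyword detection; no find/index over the whole string."""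
--     count = 0
--     in_comment = False
--     hit = False
--     window = ""
--     i, n = 0, len(content)
--     while i < n:
--         pair = content[i:i + 2]
--         if not in_comment:
--             if pair == "/*":
--                 in_comment, hit, window = True, False, ""
--                 i += 2
--             else:
--                 i += 1
--         else:
--             if pair == "*/":
--                 count += hit
--                 in_comment = False
--                 i += 2
--             else:
--                 window = (window + content[i])[-_WMAX:]
--                 hit = hit or window.endswith(_KEYWORDS)
--                 i += 1
--     return count
--
--
-- def _build_commented_count_index(
--     project_files: dict[str, str],
--     relevant_paths: set[str],
-- ) -> dict[str, int]:
--     return {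
--         p: _count_commented_methods(c)
--         for p in relevant_paths
--         if (c := project_files.get(p))
--     }
-- ===== Notes on version B (the rewrite author's own statement) =====
-- stated objective: alternative
-- what changed: Replaces A's delimiter-search loop (slice compare for '/*', content.find('*/'), then substring keyword containment) by a single-pass character-level state machine: an explicit in-comment flag and a 14-char rolling window whose endswith check detects keywords online, so no substring search or block extraction ever happens; the index is built with a dict comprehension.
import Mathlib
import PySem

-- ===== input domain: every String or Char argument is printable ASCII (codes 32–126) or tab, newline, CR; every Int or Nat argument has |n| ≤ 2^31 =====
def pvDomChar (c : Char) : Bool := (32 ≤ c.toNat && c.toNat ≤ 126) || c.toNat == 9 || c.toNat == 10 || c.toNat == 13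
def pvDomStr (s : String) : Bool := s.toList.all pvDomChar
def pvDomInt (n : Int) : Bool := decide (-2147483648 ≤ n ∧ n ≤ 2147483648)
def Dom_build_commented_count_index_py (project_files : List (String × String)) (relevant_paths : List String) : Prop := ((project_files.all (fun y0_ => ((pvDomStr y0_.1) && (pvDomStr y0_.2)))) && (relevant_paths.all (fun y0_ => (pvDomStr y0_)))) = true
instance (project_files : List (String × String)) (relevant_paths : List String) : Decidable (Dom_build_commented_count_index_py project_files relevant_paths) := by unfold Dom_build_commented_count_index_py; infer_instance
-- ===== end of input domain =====

-- B replaces A's delimiter-search loop (slice compare for "/*", content.find("*/"),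
-- keyword containment on the extracted block) by a single streaming pass: an explicit
-- in-comment state machine with a 14-char rolling window whose endswith check detects
-- keywords online; the index is built with a dict comprehension (alternative).

-- shared: the Java member keywords; both Pythons use this tuple
def pvKw : List (List Char) :=
  ["private ".toList, "public ".toList, "protected ".toList,
   "@Override".toList, "@Transactional".toList]

-- A tests `kw in block` on the extracted block
def pvAnyKw (block : List Char) : Bool :=
  pvKw.any (fun kw => PySem.Chars.isIn kw block)

-- facts about str.find(sub, start) needed by the ports' termination arguments
lemma pvFindFrom_of_ge (s sub : List Char) (k : Nat) (hk : s.length ≤ k) (hs : sub ≠ []) :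
    PySem.Chars.findFrom s sub (k : Int) = -1 := by
  rcases Nat.eq_or_lt_of_le hk with h | h
  · rw [PySem.Chars.findFrom_natCast_eq_neg_one_iff s sub k (by omega)]
    intro hinf
    rw [← h, List.drop_length, List.infix_nil] at hinf
    exact hs hinf
  · simp only [PySem.Chars.findFrom]
    split_ifs <;> push_cast at * <;> omega

lemma pvFF_bounds (cs sub : List Char) (k : Nat) (h2 : sub.length = 2)
    (h : PySem.Chars.findFrom cs sub (k : Int) ≠ -1) :
    k ≤ (PySem.Chars.findFrom cs sub (k : Int)).toNat ∧
    (PySem.Chars.findFrom cs sub (k : Int)).toNat + 2 ≤ cs.length ∧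
    0 ≤ PySem.Chars.findFrom cs sub (k : Int) ∧
    sub <+: cs.drop (PySem.Chars.findFrom cs sub (k : Int)).toNat ∧
    (∀ m, k ≤ m → m < (PySem.Chars.findFrom cs sub (k : Int)).toNat → ¬ sub <+: cs.drop m) := by
  have hnil : sub ≠ [] := by intro hn; simp [hn] at h2
  have hk : k ≤ cs.length := by
    by_contra hk'
    exact h (pvFindFrom_of_ge cs sub k (by omega) hnil)
  obtain ⟨hge, hpre, hmin⟩ := PySem.Chars.findFrom_natCast_spec cs sub k hk h
  have h0 : (0 : Int) ≤ PySem.Chars.findFrom cs sub (k : Int) := le_trans (by positivity) hge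
  have hlen := hpre.length_le
  rw [h2, List.length_drop] at hlen
  exact ⟨by omega, by omega, h0, hpre, hmin⟩

-- ===== PORT A =====
-- literal port of _count_commented_methods: character cursor i, slice compare
-- content[i:i+2] == "/*", j = content.find("*/", i+2) via PySem.Chars.findFrom
def pvLoopA (cs : List Char) (i count : Nat) : Nat :=
  if hi : i + 1 < cs.length then
    if PySem.List.slice cs (some (i : Int)) (some ((i + 2 : Nat) : Int)) = ['/', '*'] then
      if hj : PySem.Chars.findFrom cs ['*', '/'] ((i + 2 : Nat) : Int) < 0 then count
      else
        pvLoopA cs ((PySem.Chars.findFrom cs ['*', '/'] ((i + 2 : Nat) : Int)).toNat + 2)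
          (count +
            (if pvAnyKw (PySem.List.slice cs (some ((i + 2 : Nat) : Int))
                (some (PySem.Chars.findFrom cs ['*', '/'] ((i + 2 : Nat) : Int)))) then 1 else 0))
    else pvLoopA cs (i + 1) count
  else count
termination_by cs.length + 1 - i
decreasing_by
  · have hb := pvFF_bounds cs ['*', '/'] (i + 2) rfl (by omega)
    omega
  · omega

def pvCountA (content : String) : Int :=
  if content = "" ∨ PySem.Str.isIn "/*" content = false then 0
  else ((pvLoopA content.toList 0 0 : Nat) : Int)

def build_commented_count_index_py (project_files : List (String × String)) (relevant_paths : List String) : List (String × Int) :=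
  (relevant_paths.foldl
    (fun (out : PySem.Dict String Int) p =>
      match (PySem.Dict.mk project_files).get? p with
      | some content => if content ≠ "" then out.insert p (pvCountA content) else out
      | none => out)
    (PySem.Dict.mk [])).items

-- ===== PORT B =====
-- port of B's streaming state machine: one pass, pair = content[i:i+2] read as the
-- head two chars of the remaining list, window update (window + c)[-14:] via slice
def pvLoopB (cs : List Char) (inC hit : Bool) (w : List Char) (count : Nat) : Nat :=
  match cs with
  | [] => count
  | c :: rest =>
    if inC = false then
      if c = '/' ∧ rest.head? = some '*' then
        pvLoopB rest.tail true false [] count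
      else
        pvLoopB rest false hit w count
    else
      if c = '*' ∧ rest.head? = some '/' then
        pvLoopB rest.tail false hit w (count + (if hit then 1 else 0))
      else
        pvLoopB rest true
          (hit || pvKw.any (fun kw => kw.isSuffixOf (PySem.List.slice (w ++ [c]) (some (-14)) none)))
          (PySem.List.slice (w ++ [c]) (some (-14)) none) count
termination_by cs.length
decreasing_by
  all_goals simp [List.length_tail]

def pvCountB (content : String) : Int :=
  ((pvLoopB content.toList false false [] 0 : Nat) : Int)

def build_commented_count_index_py_alt (project_files : List (String × String)) (relevant_paths : List String) : List (String × Int) :=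
  (relevant_paths.foldl
    (fun (out : PySem.Dict String Int) p =>
      ((((PySem.Dict.mk project_files).get? p).filter (fun c => c ≠ "")).elim out
        (fun c => out.insert p (pvCountB c))))
    (PySem.Dict.mk [])).items

-- ===== PRECONDITION & SPEC =====
def Spec_build_commented_count_index_py (project_files : List (String × String)) (relevant_paths : List String) (out : List (String × Int)) : Prop := out = build_commented_count_index_py_alt project_files relevant_paths
instance (project_files : List (String × String)) (relevant_paths : List String) (out : List (String × Int)) : Decidable (Spec_build_commented_count_index_py project_files relevant_paths out) := by unfold Spec_build_commented_count_index_py; infer_instance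

-- ===== CLAIM (what is proved, stated in full; the proofs are below) =====
def Claim_equal_build_commented_count_index_py : Prop := ∀ (project_files : List (String × String)) (relevant_paths : List String), Dom_build_commented_count_index_py project_files relevant_paths → Spec_build_commented_count_index_py project_files relevant_paths (build_commented_count_index_py project_files relevant_paths)

-- ===== LEMMAS AND PROOFS =====

-- spec-side window and online hit flag
def pvWin (p : List Char) : List Char := p.drop (p.length - 14)
def pvHit (p : List Char) : Bool := pvKw.any (fun kw => decide (kw <:+: p))

lemma pvKw_len : ∀ kw ∈ pvKw, kw.length ≤ 14 ∧ kw ≠ [] := by decide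

-- the slice (w + c)[-14:] in the port is the spec-side window
lemma pvSliceNeg (l : List Char) :
    PySem.List.slice l (some (-14)) none = l.drop (l.length - 14) := by
  rw [PySem.List.slice_from_neg_ofNat l 14 (by omega)]

lemma pvWin_nil : pvWin [] = [] := rfl

lemma pvWin_step (p : List Char) (c : Char) :
    PySem.List.slice (pvWin p ++ [c]) (some (-14)) none = pvWin (p ++ [c]) := by
  rw [pvSliceNeg]
  unfold pvWin
  by_cases h : p.length ≤ 13
  · have h0 : p.length - 14 = 0 := by omega
    rw [h0, List.drop_zero]
  · have h14 : 14 ≤ p.length := by omega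
    have hlw : (p.drop (p.length - 14)).length = 14 := by
      rw [List.length_drop]; omega
    simp only [List.length_append, List.length_singleton, hlw]
    rw [List.drop_append_of_le_length (by omega), List.drop_append_of_le_length (by omega),
      List.drop_drop]
    congr 2
    omega

lemma pvSuffix_win_iff (kw p : List Char) (hkw : kw.length ≤ 14) :
    kw <:+ pvWin p ↔ kw <:+ p := by
  unfold pvWin
  constructor
  · intro h
    exact h.trans (List.drop_suffix _ _)
  · intro h
    have hl := h.length_le
    rw [List.suffix_iff_eq_drop] at h ⊢
    rw [List.length_drop, List.drop_drop,
      show p.length - 14 + (p.length - (p.length - 14) - kw.length) = p.length - kw.length by omega]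
    exact h

lemma pvInfix_concat_iff (kw p : List Char) (c : Char) :
    kw <:+: (p ++ [c]) ↔ kw <:+: p ∨ kw <:+ (p ++ [c]) := by
  constructor
  · rintro ⟨s, t, h⟩
    rcases List.eq_nil_or_concat t with rfl | ⟨t', c', rfl⟩
    · right
      exact ⟨s, by simpa using h⟩
    · left
      have h' : (s ++ kw ++ t') ++ [c'] = p ++ [c] := by simpa using h
      have hdl : s ++ kw ++ t' = p := by
        have := congrArg List.dropLast h'
        simpa using this
      exact ⟨s, t', hdl⟩
  · rintro (h | h)
    · exact h.trans (List.prefix_append p [c]).isInfix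
    · exact h.isInfix

lemma pvHit_step (p : List Char) (c : Char) :
    (pvHit p || pvKw.any (fun kw => kw.isSuffixOf (PySem.List.slice (pvWin p ++ [c]) (some (-14)) none)))
      = pvHit (p ++ [c]) := by
  rw [pvWin_step]
  rw [Bool.eq_iff_iff]
  simp only [pvHit, Bool.or_eq_true, List.any_eq_true, decide_eq_true_eq,
    List.isSuffixOf_iff_suffix]
  constructor
  · rintro (⟨kw, hm, h⟩ | ⟨kw, hm, h⟩)
    · exact ⟨kw, hm, (pvInfix_concat_iff kw p c).2 (Or.inl h)⟩
    · exact ⟨kw, hm, (pvInfix_concat_iff kw p c).2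
        (Or.inr ((pvSuffix_win_iff kw (p ++ [c]) (pvKw_len kw hm).1).1 h))⟩
  · rintro ⟨kw, hm, h⟩
    rcases (pvInfix_concat_iff kw p c).1 h with h | h
    · exact Or.inl ⟨kw, hm, h⟩
    · exact Or.inr ⟨kw, hm, (pvSuffix_win_iff kw (p ++ [c]) (pvKw_len kw hm).1).2 h⟩

-- A's `kw in block` equals the spec-side hit flag
lemma pvAnyKw_eq (b : List Char) : pvAnyKw b = pvHit b := by
  rw [Bool.eq_iff_iff]
  simp [pvAnyKw, pvHit, List.any_eq_true, PySem.Chars.isIn_iff_infix]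

-- pair tests as prefix events
lemma pvPair_iff (cs : List Char) (i : Nat) (hi : i < cs.length) (a b : Char) :
    ((cs[i] = a ∧ (cs.drop (i+1)).head? = some b) ↔ [a, b] <+: cs.drop i) := by
  have hcons : cs.drop i = cs[i] :: cs.drop (i+1) := List.drop_eq_getElem_cons hi
  cases hd : cs.drop (i+1) with
  | nil =>
    rw [hcons, hd]
    constructor
    · rintro ⟨h1, h2⟩
      simp at h2
    · intro h
      have := h.length_le
      simp at this
  | cons x xs =>
    rw [hcons, hd]
    constructor
    · rintro ⟨h1, h2⟩
      simp only [List.head?_cons, Option.some.injEq] at h2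
      rw [h1, h2]
      exact ⟨xs, rfl⟩
    · intro h
      rw [List.cons_prefix_cons] at h
      obtain ⟨h1, h2⟩ := h
      rw [List.cons_prefix_cons] at h2
      exact ⟨h1.symm, by simp [h2.1.symm]⟩

-- the slice test content[i:i+2] == "/*" is the prefix event at i
lemma pvSlice2 (cs : List Char) (k : Nat) :
    (PySem.List.slice cs (some (k : Int)) (some ((k + 2 : Nat) : Int)) = ['/', '*'])
      ↔ (['/', '*'] <+: cs.drop k) := by
  rw [PySem.List.slice_natCast cs k (k + 2), List.prefix_iff_eq_take]
  have hd : k + 2 - k = 2 := by omega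
  have hl : (['/', '*'] : List Char).length = 2 := rfl
  rw [hd, hl]
  exact eq_comm

lemma pvFF_lt_iff (cs sub : List Char) (k : Nat) (h2 : sub.length = 2) :
    (PySem.Chars.findFrom cs sub (k : Int) < 0) ↔ (PySem.Chars.findFrom cs sub (k : Int) = -1) := by
  constructor <;> intro h
  · by_contra hne
    have := (pvFF_bounds cs sub k h2 hne).2.2.1
    omega
  · omega

-- unique-first-occurrence characterisation of find(sub, k)
lemma pvFF_eq_of (cs sub : List Char) (k j : Nat) (h2 : sub.length = 2) (hkj : k ≤ j)
    (hp : sub <+: cs.drop j) (hmin : ∀ m, k ≤ m → m < j → ¬ sub <+: cs.drop m) :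
    PySem.Chars.findFrom cs sub (k : Int) = (j : Int) := by
  have hjlen := hp.length_le
  rw [h2, List.length_drop] at hjlen
  have hne : PySem.Chars.findFrom cs sub (k : Int) ≠ -1 := by
    intro hEq
    rw [PySem.Chars.findFrom_natCast_eq_neg_one_iff cs sub k (by omega)] at hEq
    apply hEq
    have hp' : sub <+: (cs.drop k).drop (j - k) := by
      have hkj' : k + (j - k) = j := by omega
      rwa [List.drop_drop, hkj']
    exact hp'.isInfix.trans (List.drop_suffix _ _).isInfix
  obtain ⟨hge, hlen, h0, hpre, hmin'⟩ := pvFF_bounds cs sub k h2 hne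
  have htk : (PySem.Chars.findFrom cs sub (k : Int)).toNat = j := by
    rcases Nat.lt_trichotomy (PySem.Chars.findFrom cs sub (k : Int)).toNat j with h | h | h
    · exact absurd hpre (hmin _ hge h)
    · exact h
    · exact absurd hp (hmin' j hkj h)
  omega

-- skipping a non-occurrence position does not change find
lemma pvFF_step (cs sub : List Char) (k : Nat) (h2 : sub.length = 2)
    (hnp : ¬ sub <+: cs.drop k) :
    PySem.Chars.findFrom cs sub (k : Int) = PySem.Chars.findFrom cs sub ((k + 1 : Nat) : Int) := by
  by_cases h : PySem.Chars.findFrom cs sub ((k + 1 : Nat) : Int) = -1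
  · rw [h]
    by_contra h0
    obtain ⟨hge, hlen, hpos, hpre, hmin⟩ := pvFF_bounds cs sub k h2 h0
    have hne : (PySem.Chars.findFrom cs sub (k : Int)).toNat ≠ k := by
      intro he; rw [he] at hpre; exact hnp hpre
    have := pvFF_eq_of cs sub (k + 1) (PySem.Chars.findFrom cs sub (k : Int)).toNat h2
      (by omega) hpre (fun m hm1 hm2 => hmin m (by omega) hm2)
    rw [h] at this
    omega
  · obtain ⟨hge, hlen, hpos, hpre, hmin⟩ := pvFF_bounds cs sub (k + 1) h2 h
    have := pvFF_eq_of cs sub k (PySem.Chars.findFrom cs sub ((k + 1 : Nat) : Int)).toNat h2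
      (by omega) hpre
      (fun m hm1 hm2 => by
        rcases Nat.eq_or_lt_of_le hm1 with he | hlt
        · rw [← he]; exact hnp
        · exact hmin m hlt hm2)
    rw [this]
    omega

-- inside-comment run of B from index i: steps to the first "*/" accumulating the
-- online hit flag, which matches keyword containment in the block
lemma pvLoopB_inside (cs : List Char) :
    ∀ fuel s i count, s ≤ i → i ≤ cs.length → cs.length + 1 - i ≤ fuel →
      pvLoopB (cs.drop i) true (pvHit ((cs.drop s).take (i - s))) (pvWin ((cs.drop s).take (i - s))) count =
        if PySem.Chars.findFrom cs ['*', '/'] (i : Int) = -1 then count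
        else
          pvLoopB (cs.drop ((PySem.Chars.findFrom cs ['*', '/'] (i : Int)).toNat + 2)) false
            (pvHit ((cs.drop s).take ((PySem.Chars.findFrom cs ['*', '/'] (i : Int)).toNat - s)))
            (pvWin ((cs.drop s).take ((PySem.Chars.findFrom cs ['*', '/'] (i : Int)).toNat - s)))
            (count + (if pvHit ((cs.drop s).take ((PySem.Chars.findFrom cs ['*', '/'] (i : Int)).toNat - s)) then 1 else 0)) := by
  intro fuel
  induction fuel with
  | zero => intro s i count hs hi hf; omega
  | succ f ih =>
    intro s i count hs hi hf
    rcases Nat.eq_or_lt_of_le hi with heq | hlt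
    · rw [heq, List.drop_length, pvLoopB,
        pvFindFrom_of_ge cs ['*', '/'] cs.length le_rfl (by simp), if_pos rfl]
    · rw [List.drop_eq_getElem_cons hlt, pvLoopB]
      rw [if_neg (by simp : ¬ (true = false))]
      by_cases hp : cs[i] = '*' ∧ (cs.drop (i + 1)).head? = some '/'
      · have hpre : ['*', '/'] <+: cs.drop i := (pvPair_iff cs i hlt '*' '/').1 hp
        have hF : PySem.Chars.findFrom cs ['*', '/'] (i : Int) = (i : Int) :=
          pvFF_eq_of cs ['*', '/'] i i rfl le_rfl hpre (fun m h1 h2 => by omega)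
        rw [if_pos hp, hF, if_neg (by omega : ¬ ((i : Int) = -1)), Int.toNat_natCast,
          List.tail_drop]
      · rw [if_neg hp]
        have hnp : ¬ ['*', '/'] <+: cs.drop i := fun h => hp ((pvPair_iff cs i hlt '*' '/').2 h)
        have hstep : PySem.Chars.findFrom cs ['*', '/'] (i : Int)
            = PySem.Chars.findFrom cs ['*', '/'] ((i + 1 : Nat) : Int) :=
          pvFF_step cs ['*', '/'] i rfl hnp
        have htake : (cs.drop s).take (i + 1 - s) = (cs.drop s).take (i - s) ++ [cs[i]] := by
          have hlen : i - s < (cs.drop s).length := by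
            simp only [List.length_drop]; omega
          rw [show i + 1 - s = (i - s) + 1 by omega, List.take_add_one,
            List.getElem?_eq_getElem hlen]
          have hsi : s + (i - s) = i := by omega
          simp only [Option.toList_some, List.getElem_drop, hsi]
        rw [pvHit_step ((cs.drop s).take (i - s)) cs[i],
          pvWin_step ((cs.drop s).take (i - s)) cs[i], ← htake,
          hstep, ih s (i + 1) count (by omega) (by omega) (by omega)]

-- outside-comment: B's scan from index i equals A's loop from i (hit/window are dead)
lemma pvLoopAB (cs : List Char) :
    ∀ fuel i count hit w, i ≤ cs.length → cs.length + 1 - i ≤ fuel →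
      pvLoopB (cs.drop i) false hit w count = pvLoopA cs i count := by
  intro fuel
  induction fuel with
  | zero => intro i count hit w hi hf; omega
  | succ f ih =>
    intro i count hit w hi hf
    rw [pvLoopA]
    by_cases hib : i + 1 < cs.length
    · have hlt : i < cs.length := by omega
      rw [dif_pos hib, List.drop_eq_getElem_cons hlt, pvLoopB, if_pos rfl]
      by_cases hp : cs[i] = '/' ∧ (cs.drop (i + 1)).head? = some '*'
      · have hpre : ['/', '*'] <+: cs.drop i := (pvPair_iff cs i hlt '/' '*').1 hp
        rw [if_pos hp, if_pos ((pvSlice2 cs i).2 hpre), List.tail_drop]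
        have hin := pvLoopB_inside cs (cs.length + 1 - (i + 2)) (i + 2) (i + 2) count
          le_rfl (by omega) le_rfl
        rw [Nat.sub_self, List.take_zero, show pvHit [] = false by decide, pvWin_nil] at hin
        rw [hin]
        by_cases hj : PySem.Chars.findFrom cs ['*', '/'] ((i + 2 : Nat) : Int) = -1
        · rw [if_pos hj, dif_pos (by omega)]
        · rw [if_neg hj, dif_neg (by rw [pvFF_lt_iff cs ['*', '/'] (i + 2) rfl]; exact hj)]
          obtain ⟨hge, hlen, hpos, _, _⟩ := pvFF_bounds cs ['*', '/'] (i + 2) rfl hj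
          have hblk : pvAnyKw (PySem.List.slice cs (some ((i + 2 : Nat) : Int))
                (some (PySem.Chars.findFrom cs ['*', '/'] ((i + 2 : Nat) : Int))))
              = pvHit ((cs.drop (i + 2)).take
                ((PySem.Chars.findFrom cs ['*', '/'] ((i + 2 : Nat) : Int)).toNat - (i + 2))) := by
            rw [pvAnyKw_eq]
            congr 1
            rw [show PySem.Chars.findFrom cs ['*', '/'] ((i + 2 : Nat) : Int)
                = (((PySem.Chars.findFrom cs ['*', '/'] ((i + 2 : Nat) : Int)).toNat : Nat) : Int)
              by omega, PySem.List.slice_natCast]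
            simp only [Int.toNat_natCast]
          rw [hblk,
            ih ((PySem.Chars.findFrom cs ['*', '/'] ((i + 2 : Nat) : Int)).toNat + 2) _ _ _
              (by omega) (by omega)]
      · rw [if_neg hp]
        have hnp : ¬ ['/', '*'] <+: cs.drop i := fun h => hp ((pvPair_iff cs i hlt '/' '*').2 h)
        rw [if_neg (fun h => hnp ((pvSlice2 cs i).1 h))]
        exact ih (i + 1) count hit w (by omega) (by omega)
    · rw [dif_neg hib]
      rcases Nat.eq_or_lt_of_le hi with heq | hlt
      · rw [heq, List.drop_length, pvLoopB]
      · have hi1 : i + 1 = cs.length := by omega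
        rw [List.drop_eq_getElem_cons hlt, pvLoopB, if_pos rfl]
        rw [if_neg (by
          rintro ⟨h1, h2⟩
          rw [hi1, List.drop_length] at h2
          simp at h2)]
        rw [hi1, List.drop_length, pvLoopB]

-- with no "/*" anywhere, A's loop returns its accumulator
lemma pvLoopA_noopen (cs : List Char) (hno : ∀ m, ¬ ['/', '*'] <+: cs.drop m) :
    ∀ fuel i count, cs.length + 1 - i ≤ fuel → pvLoopA cs i count = count := by
  intro fuel
  induction fuel with
  | zero => intro i count hf; rw [pvLoopA]; rw [dif_neg]; omega
  | succ f ih =>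
    intro i count hf
    rw [pvLoopA]
    by_cases hib : i + 1 < cs.length
    · rw [dif_pos hib, if_neg (fun h => hno i ((pvSlice2 cs i).1 h))]
      exact ih (i + 1) count (by omega)
    · rw [dif_neg hib]

lemma pvCountA_eq (content : String) : pvCountA content = pvCountB content := by
  unfold pvCountA pvCountB
  have hAB : pvLoopB content.toList false false [] 0 = pvLoopA content.toList 0 0 := by
    have := pvLoopAB content.toList (content.toList.length + 1) 0 0 false [] (by omega) (by omega)
    simpa using this
  by_cases hg : content = "" ∨ PySem.Str.isIn "/*" content = false
  · rw [if_pos hg, hAB]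
    have hno : ∀ m, ¬ ['/', '*'] <+: content.toList.drop m := by
      intro m hpre
      rcases hg with hg | hg
      · have := hpre.length_le
        simp [hg] at this
      · rw [PySem.Str.isIn_eq] at hg
        have := (PySem.Chars.isIn_eq_false_iff _ _).1 hg
        exact this (hpre.isInfix.trans (List.drop_suffix _ _).isInfix)
    rw [pvLoopA_noopen content.toList hno (content.toList.length + 1) 0 0 (by omega)]
    simp
  · rw [if_neg hg, hAB]

-- ===== VERDICT (by name: the statement is the Claim_ definition above) =====
theorem build_commented_count_index_py_spec : Claim_equal_build_commented_count_index_py := by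
  intro project_files relevant_paths _hdom
  unfold Spec_build_commented_count_index_py
  unfold build_commented_count_index_py build_commented_count_index_py_alt
  congr 2
  funext out p
  cases h : (PySem.Dict.mk project_files).get? p with
  | none => simp [Option.filter]
  | some content =>
    by_cases hc : content = ""
    · simp [Option.filter, hc]
    · simp [Option.filter, hc, pvCountA_eq]
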